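-- pv_equiv track=rewrite | github.com/DCalhas/eeg_to_fmri | src/gen_dims_utils.py | get_possible_kernel_size_deconv
-- ===== SOURCE A (Python) =====
-- def get_possible_kernel_size_deconv(input_shape, output_shape, next_input_shape=None):
-- 	#list of tuples where #1 is kernel size and #2 is stride size
-- 	possible_combinations = []
--
--
-- 	##################################################################################################################
-- 	#
-- 	#							CASE WHERE WE DIMENSION SHRINKS BY ONE WITH RESHAPE AFTERWARDS
-- 	#
-- 	##################################################################################################################
-- 	if(type(input_shape) is tuple and next_input_shape == None):
-- 		for stride_0 in range(1, output_shape):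
-- 			for kernel_0 in range(1, output_shape):
-- 				for stride_1 in range(1, output_shape):
-- 					for kernel_1 in range(1, output_shape):
-- 						#only accept dim = output desired and that are bigger than half the
-- 						if((input_shape[0] * stride_0 + max(kernel_0 - stride_0, 0))*(input_shape[1] * stride_1 + max(kernel_1 - stride_1, 0)) == output_shape and
-- 							(kernel_0 >= stride_0 and kernel_1 >= stride_1)):
-- 							possible_combinations += [((kernel_0, kernel_1), (stride_0, stride_1))]
-- 							#fix this, it takes to much time trying it for all the points
-- 							#wrapper to return first valid kernel and stride combination
-- 							return possible_combinations
--
-- 	elif(type(input_shape) is tuple and next_input_shape != None):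
-- 		for stride_0 in range(1, output_shape):
-- 			for kernel_0 in range(1, output_shape):
-- 				if(input_shape[0] * stride_0 + max(kernel_0 - stride_0, 0) <= next_input_shape[0]):
-- 					for stride_1 in range(1, output_shape):
-- 						for kernel_1 in range(1, output_shape):
-- 							#only accept dim = output desired and that are bigger than half the
-- 							if((input_shape[0] * stride_0 + max(kernel_0 - stride_0, 0))*(input_shape[1] * stride_1 + max(kernel_1 - stride_1, 0)) == output_shape and
-- 								#(kernel_0 >= stride_0 and kernel_1 >= stride_1) and
-- 								input_shape[1] * stride_1 + max(kernel_1 - stride_1, 0) <= next_input_shape[1]):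
--
-- 								possible_combinations += [((kernel_0, kernel_1), (stride_0, stride_1))]
-- 								#fix this, it takes to much time trying it for all the points
-- 								#wrapper to return first valid kernel and stride combination
-- 								return possible_combinations
--
-- 	else:
-- 		for stride in range(1, output_shape):
-- 			for kernel in range(1, output_shape):
--
-- 				#only accept dim = output desired and that are bigger than half the
-- 				if(input_shape * stride + max(kernel - stride, 0) == output_shape and kernel >= stride):
-- 					possible_combinations += [(kernel, stride)]
-- 					#fix this, it takes to much time trying it for all the points
-- 					#wrapper to return first valid kernel and stride combination
-- 					return possible_combinations
--
-- 	return possible_combinations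
-- ===== SOURCE B (Python) =====
-- def _first_pair_ge(in1, d1, output_shape):
--     # first (s1, k1) in lex order with 1 <= s1, k1 <= output_shape-1,
--     # k1 >= s1 and in1*s1 + (k1 - s1) == d1  (closed-form k1 per stride)
--     for s1 in range(1, output_shape):
--         k1 = d1 - (in1 - 1) * s1
--         if s1 <= k1 <= output_shape - 1:
--             return (s1, k1)
--     return None
--
--
-- def _first_pair_any(in1, d1, output_shape):
--     # first (s1, k1) in lex order with 1 <= s1, k1 <= output_shape-1
--     # and in1*s1 + max(k1 - s1, 0) == d1  (closed-form k1 per stride)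
--     for s1 in range(1, output_shape):
--         if in1 * s1 == d1:
--             return (s1, 1)
--         k1 = d1 - in1 * s1 + s1
--         if s1 < k1 <= output_shape - 1:
--             return (s1, k1)
--     return None
--
--
-- def get_possible_kernel_size_deconv(input_shape, output_shape, next_input_shape=None):
--     in0, in1 = input_shape
--     if next_input_shape is None:
--         for s0 in range(1, output_shape):
--             for k0 in range(s0, output_shape):
--                 dim0 = in0 * s0 + (k0 - s0)
--                 if dim0 != 0 and output_shape % dim0 == 0:
--                     r = _first_pair_ge(in1, output_shape // dim0, output_shape)
--                     if r is not None:
--                         s1, k1 = r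
--                         return [((k0, k1), (s0, s1))]
--     else:
--         n0, n1 = next_input_shape
--         for s0 in range(1, output_shape):
--             for k0 in range(1, output_shape):
--                 dim0 = in0 * s0 + max(k0 - s0, 0)
--                 if dim0 <= n0 and dim0 != 0 and output_shape % dim0 == 0:
--                     d1 = output_shape // dim0
--                     if d1 <= n1:
--                         r = _first_pair_any(in1, d1, output_shape)
--                         if r is not None:
--                             s1, k1 = r
--                             return [((k0, k1), (s0, s1))]
--     return []
-- ===== Notes on version B (the rewrite author's own statement) =====
-- stated objective: alternative
-- what changed: Instead of brute-forcing all (stride0,kernel0,stride1,kernel1) 4-tuples, B scans (stride0,kernel0) pairs, keeps only first-axis dims that divide output_shape, and finds the second-axis pair by a closed-form kernel per stride, preserving A's lexicographic first-hit order.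
import Mathlib
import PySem

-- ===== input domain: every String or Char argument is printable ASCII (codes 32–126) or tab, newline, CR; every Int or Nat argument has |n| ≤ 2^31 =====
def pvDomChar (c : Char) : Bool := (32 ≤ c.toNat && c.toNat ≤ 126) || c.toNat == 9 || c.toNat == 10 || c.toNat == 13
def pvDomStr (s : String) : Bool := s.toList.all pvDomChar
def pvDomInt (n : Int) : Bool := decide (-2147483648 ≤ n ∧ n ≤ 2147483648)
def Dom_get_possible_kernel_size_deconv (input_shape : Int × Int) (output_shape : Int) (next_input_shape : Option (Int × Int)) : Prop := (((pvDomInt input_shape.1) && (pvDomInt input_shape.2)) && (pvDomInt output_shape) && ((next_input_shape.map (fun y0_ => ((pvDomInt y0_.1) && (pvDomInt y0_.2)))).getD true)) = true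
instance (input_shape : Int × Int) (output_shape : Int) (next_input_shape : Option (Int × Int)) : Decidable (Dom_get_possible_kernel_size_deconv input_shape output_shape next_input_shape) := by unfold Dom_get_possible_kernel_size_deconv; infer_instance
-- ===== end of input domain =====

-- B replaces A's brute-force scan over all (stride, kernel) 4-tuples by a divisor test on the
-- first-axis dimension plus a closed-form kernel per second-axis stride (objective: alternative).

-- ===== PORT A =====
-- A's four nested loops with an early `return [hit]` are ported as nested findSome? over the
-- same ranges in the same order; `input_shape` is always a tuple under the type convention,
-- so Python's non-tuple `else` branch is unreachable and not ported.
def get_possible_kernel_size_deconv (input_shape : Int × Int) (output_shape : Int) (next_input_shape : Option (Int × Int)) : List ((Int × Int) × (Int × Int)) :=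
  match next_input_shape with
  | none =>
    match (PySem.List.pyRange 1 output_shape 1).findSome? (fun s0 =>
      (PySem.List.pyRange 1 output_shape 1).findSome? (fun k0 =>
        (PySem.List.pyRange 1 output_shape 1).findSome? (fun s1 =>
          (PySem.List.pyRange 1 output_shape 1).findSome? (fun k1 =>
            if (input_shape.1 * s0 + max (k0 - s0) 0) * (input_shape.2 * s1 + max (k1 - s1) 0) = output_shape ∧ (s0 ≤ k0 ∧ s1 ≤ k1)
            then some ((k0, k1), (s0, s1)) else none)))) with
    | some v => [v]
    | none => []
  | some nx =>
    match (PySem.List.pyRange 1 output_shape 1).findSome? (fun s0 =>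
      (PySem.List.pyRange 1 output_shape 1).findSome? (fun k0 =>
        if input_shape.1 * s0 + max (k0 - s0) 0 ≤ nx.1 then
          (PySem.List.pyRange 1 output_shape 1).findSome? (fun s1 =>
            (PySem.List.pyRange 1 output_shape 1).findSome? (fun k1 =>
              if (input_shape.1 * s0 + max (k0 - s0) 0) * (input_shape.2 * s1 + max (k1 - s1) 0) = output_shape ∧ input_shape.2 * s1 + max (k1 - s1) 0 ≤ nx.2
              then some ((k0, k1), (s0, s1)) else none))
        else none)) with
    | some v => [v]
    | none => []

-- ===== PORT B =====
-- first (s1, k1) with k1 ≥ s1 and in1*s1 + (k1 - s1) = d1, k1 in [1, out-1]: closed-form k1 per s1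
def firstPairGE (in1 d1 out : Int) : Option (Int × Int) :=
  (PySem.List.pyRange 1 out 1).findSome? (fun s1 =>
    if s1 ≤ d1 - (in1 - 1) * s1 ∧ d1 - (in1 - 1) * s1 ≤ out - 1 then some (s1, d1 - (in1 - 1) * s1) else none)

-- first (s1, k1) with in1*s1 + max(k1 - s1, 0) = d1, k1 in [1, out-1]: k1 = 1 if in1*s1 = d1, else closed form
def firstPairAny (in1 d1 out : Int) : Option (Int × Int) :=
  (PySem.List.pyRange 1 out 1).findSome? (fun s1 =>
    if in1 * s1 = d1 then some (s1, 1)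
    else if s1 < d1 - in1 * s1 + s1 ∧ d1 - in1 * s1 + s1 ≤ out - 1 then some (s1, d1 - in1 * s1 + s1) else none)

def get_possible_kernel_size_deconv_alt (input_shape : Int × Int) (output_shape : Int) (next_input_shape : Option (Int × Int)) : List ((Int × Int) × (Int × Int)) :=
  match next_input_shape with
  | none =>
    match (PySem.List.pyRange 1 output_shape 1).findSome? (fun s0 =>
      (PySem.List.pyRange s0 output_shape 1).findSome? (fun k0 =>
        if input_shape.1 * s0 + (k0 - s0) ≠ 0 ∧ PySem.Int.mod output_shape (input_shape.1 * s0 + (k0 - s0)) = 0 then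
          (firstPairGE input_shape.2 (PySem.Int.floordiv output_shape (input_shape.1 * s0 + (k0 - s0))) output_shape).map
            (fun p => ((k0, p.2), (s0, p.1)))
        else none)) with
    | some v => [v]
    | none => []
  | some nx =>
    match (PySem.List.pyRange 1 output_shape 1).findSome? (fun s0 =>
      (PySem.List.pyRange 1 output_shape 1).findSome? (fun k0 =>
        if input_shape.1 * s0 + max (k0 - s0) 0 ≤ nx.1 ∧ input_shape.1 * s0 + max (k0 - s0) 0 ≠ 0 ∧ PySem.Int.mod output_shape (input_shape.1 * s0 + max (k0 - s0) 0) = 0 then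
          if PySem.Int.floordiv output_shape (input_shape.1 * s0 + max (k0 - s0) 0) ≤ nx.2 then
            (firstPairAny input_shape.2 (PySem.Int.floordiv output_shape (input_shape.1 * s0 + max (k0 - s0) 0)) output_shape).map
              (fun p => ((k0, p.2), (s0, p.1)))
          else none
        else none)) with
    | some v => [v]
    | none => []

-- ===== PRECONDITION & SPEC =====
def Spec_get_possible_kernel_size_deconv (input_shape : Int × Int) (output_shape : Int) (next_input_shape : Option (Int × Int)) (out : List ((Int × Int) × (Int × Int))) : Prop := out = get_possible_kernel_size_deconv_alt input_shape output_shape next_input_shape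
instance (input_shape : Int × Int) (output_shape : Int) (next_input_shape : Option (Int × Int)) (out : List ((Int × Int) × (Int × Int))) : Decidable (Spec_get_possible_kernel_size_deconv input_shape output_shape next_input_shape out) := by unfold Spec_get_possible_kernel_size_deconv; infer_instance

-- ===== CLAIM (what is proved, stated in full; the proofs are below) =====
def Claim_equal_get_possible_kernel_size_deconv : Prop := ∀ (input_shape : Int × Int) (output_shape : Int) (next_input_shape : Option (Int × Int)), Dom_get_possible_kernel_size_deconv input_shape output_shape next_input_shape → Spec_get_possible_kernel_size_deconv input_shape output_shape next_input_shape (get_possible_kernel_size_deconv input_shape output_shape next_input_shape)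

-- ===== LEMMAS AND PROOFS =====

theorem pv_findSome?_congr {α β : Type} {f g : α → Option β} {l : List α}
    (h : ∀ x ∈ l, f x = g x) : l.findSome? f = l.findSome? g := by
  induction l with
  | nil => rfl
  | cons a l ih =>
    rw [List.findSome?_cons, List.findSome?_cons, h a (by simp),
      ih (fun x hx => h x (by simp [hx]))]

theorem pv_findSome?_unique {β : Type} {f : Int → Option β} {l : List Int} {t : Int}
    (h : ∀ x ∈ l, x ≠ t → f x = none) : l.findSome? f = if t ∈ l then f t else none := by
  induction l with
  | nil => simp
  | cons a l ih =>
    by_cases hat : a = t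
    · cases hfa : f a with
      | some v => simp [hfa, ← hat]
      | none =>
        have hnone : l.findSome? f = none := by
          rw [List.findSome?_eq_none_iff]
          intro x hx
          by_cases hxt : x = t
          · rw [hxt, ← hat]; exact hfa
          · exact h x (by simp [hx]) hxt
        simp [hfa, hnone, ← hat]
    · rw [List.findSome?_cons, h a (by simp) hat]
      rw [ih (fun x hx hxt => h x (by simp [hx]) hxt)]
      by_cases htl : t ∈ l
      · rw [if_pos htl, if_pos (List.mem_cons_of_mem a htl)]
      · rw [if_neg htl, if_neg (by simp [htl, Ne.symm hat])]

theorem pv_mul_floordiv {out d0 : Int} (hm : PySem.Int.mod out d0 = 0) :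
    d0 * PySem.Int.floordiv out d0 = out := by
  have h2 := PySem.Int.floordiv_mul_add_mod out d0
  rw [hm, add_zero] at h2
  rw [mul_comm]
  exact h2

-- branch 1, fixed (s0, k0) with s0 ≤ k0 and d0 ∣ out: A's inner double loop = B's closed-form scan
theorem pv_inner1 (in1 out d0 s0 k0 : Int) (hd0 : d0 ≠ 0) (hm : PySem.Int.mod out d0 = 0) (hk : s0 ≤ k0) :
    (PySem.List.pyRange 1 out 1).findSome? (fun s1 =>
      (PySem.List.pyRange 1 out 1).findSome? (fun k1 =>
        if d0 * (in1 * s1 + max (k1 - s1) 0) = out ∧ (s0 ≤ k0 ∧ s1 ≤ k1)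
        then some ((k0, k1), (s0, s1)) else none))
    = (firstPairGE in1 (PySem.Int.floordiv out d0) out).map (fun p => ((k0, p.2), (s0, p.1))) := by
  have hdd : d0 * PySem.Int.floordiv out d0 = out := pv_mul_floordiv hm
  set d1 := PySem.Int.floordiv out d0 with hd1
  rw [firstPairGE, List.map_findSome?]
  apply pv_findSome?_congr
  intro s1 hs1
  rw [PySem.List.mem_pyRange_one] at hs1
  have huniq : ∀ k1 ∈ PySem.List.pyRange 1 out 1, k1 ≠ d1 - (in1 - 1) * s1 →
      (if d0 * (in1 * s1 + max (k1 - s1) 0) = out ∧ (s0 ≤ k0 ∧ s1 ≤ k1)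
       then some ((k0, k1), (s0, s1)) else none) = none := by
    intro k1 _ hne
    rw [if_neg]
    rintro ⟨hprod, -, hsk⟩
    have hmax : max (k1 - s1) 0 = k1 - s1 := by omega
    rw [hmax] at hprod
    have hc := mul_left_cancel₀ hd0 (hprod.trans hdd.symm)
    apply hne
    linarith [hc]
  rw [pv_findSome?_unique huniq]
  simp only [Function.comp_apply]
  by_cases hg : s1 ≤ d1 - (in1 - 1) * s1 ∧ d1 - (in1 - 1) * s1 ≤ out - 1
  · have hmem : d1 - (in1 - 1) * s1 ∈ PySem.List.pyRange 1 out 1 :=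
      PySem.List.mem_pyRange_one.mpr ⟨by omega, by omega⟩
    have hcond : d0 * (in1 * s1 + max (d1 - (in1 - 1) * s1 - s1) 0) = out ∧
        (s0 ≤ k0 ∧ s1 ≤ d1 - (in1 - 1) * s1) := by
      refine ⟨?_, hk, hg.1⟩
      have hmax : max (d1 - (in1 - 1) * s1 - s1) 0 = d1 - (in1 - 1) * s1 - s1 := by omega
      rw [hmax]
      have harith : in1 * s1 + (d1 - (in1 - 1) * s1 - s1) = d1 := by ring
      rw [harith]
      exact hdd
    rw [if_pos hmem, if_pos hg, if_pos hcond, Option.map_some]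
  · rw [if_neg hg, Option.map_none]
    by_cases hmem : d1 - (in1 - 1) * s1 ∈ PySem.List.pyRange 1 out 1
    · rw [if_pos hmem, if_neg]
      rw [PySem.List.mem_pyRange_one] at hmem
      rintro ⟨-, -, hsk⟩
      exact hg ⟨hsk, by omega⟩
    · rw [if_neg hmem]

-- branch 2, fixed (s0, k0) with d0 ∣ out and out/d0 ≤ nx2: A's inner double loop = B's closed-form scan
theorem pv_inner2 (in1 out d0 nx2 s0 k0 : Int) (hd0 : d0 ≠ 0) (hm : PySem.Int.mod out d0 = 0)
    (hle : PySem.Int.floordiv out d0 ≤ nx2) :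
    (PySem.List.pyRange 1 out 1).findSome? (fun s1 =>
      (PySem.List.pyRange 1 out 1).findSome? (fun k1 =>
        if d0 * (in1 * s1 + max (k1 - s1) 0) = out ∧ in1 * s1 + max (k1 - s1) 0 ≤ nx2
        then some ((k0, k1), (s0, s1)) else none))
    = (firstPairAny in1 (PySem.Int.floordiv out d0) out).map (fun p => ((k0, p.2), (s0, p.1))) := by
  have hdd : d0 * PySem.Int.floordiv out d0 = out := pv_mul_floordiv hm
  set d1 := PySem.Int.floordiv out d0 with hd1
  rw [firstPairAny, List.map_findSome?]
  apply pv_findSome?_congr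
  intro s1 hs1
  rw [PySem.List.mem_pyRange_one] at hs1
  by_cases hcase : in1 * s1 = d1
  · have hout : (1 : Int) < out := by omega
    rw [PySem.List.pyRange_one_cons hout, List.findSome?_cons]
    have h1 : (if d0 * (in1 * s1 + max ((1 : Int) - s1) 0) = out ∧ in1 * s1 + max ((1 : Int) - s1) 0 ≤ nx2
        then some ((k0, (1 : Int)), (s0, s1)) else none) = some ((k0, (1 : Int)), (s0, s1)) := by
      rw [if_pos]
      have hmax : max ((1 : Int) - s1) 0 = 0 := by omega
      rw [hmax, add_zero, hcase]
      exact ⟨hdd, hle⟩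
    rw [h1]
    simp only [Function.comp, if_pos hcase, Option.map_some]
  · have huniq : ∀ k1 ∈ PySem.List.pyRange 1 out 1, k1 ≠ d1 - in1 * s1 + s1 →
        (if d0 * (in1 * s1 + max (k1 - s1) 0) = out ∧ in1 * s1 + max (k1 - s1) 0 ≤ nx2
         then some ((k0, k1), (s0, s1)) else none) = none := by
      intro k1 _ hne
      rw [if_neg]
      rintro ⟨hprod, -⟩
      have hc := mul_left_cancel₀ hd0 (hprod.trans hdd.symm)
      by_cases hks : s1 ≤ k1
      · have hmax : max (k1 - s1) 0 = k1 - s1 := by omega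
        rw [hmax] at hc
        apply hne
        linarith [hc]
      · have hmax : max (k1 - s1) 0 = 0 := by omega
        rw [hmax, add_zero] at hc
        exact hcase hc
    rw [pv_findSome?_unique huniq]
    simp only [Function.comp, if_neg hcase]
    by_cases hg : s1 < d1 - in1 * s1 + s1 ∧ d1 - in1 * s1 + s1 ≤ out - 1
    · have hmem : d1 - in1 * s1 + s1 ∈ PySem.List.pyRange 1 out 1 :=
        PySem.List.mem_pyRange_one.mpr ⟨by omega, by omega⟩
      have hcond : d0 * (in1 * s1 + max (d1 - in1 * s1 + s1 - s1) 0) = out ∧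
          in1 * s1 + max (d1 - in1 * s1 + s1 - s1) 0 ≤ nx2 := by
        have hmax : max (d1 - in1 * s1 + s1 - s1) 0 = d1 - in1 * s1 + s1 - s1 := by omega
        rw [hmax]
        have harith : in1 * s1 + (d1 - in1 * s1 + s1 - s1) = d1 := by ring
        rw [harith]
        exact ⟨hdd, hle⟩
      rw [if_pos hmem, if_pos hg, if_pos hcond, Option.map_some]
    · rw [if_neg hg, Option.map_none]
      by_cases hmem : d1 - in1 * s1 + s1 ∈ PySem.List.pyRange 1 out 1
      · rw [if_pos hmem, if_neg]
        rw [PySem.List.mem_pyRange_one] at hmem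
        rintro ⟨hprod, -⟩
        have hc := mul_left_cancel₀ hd0 (hprod.trans hdd.symm)
        by_cases hks : s1 ≤ d1 - in1 * s1 + s1
        · have hmax : max (d1 - in1 * s1 + s1 - s1) 0 = d1 - in1 * s1 + s1 - s1 := by omega
          rw [hmax] at hc
          exact hg ⟨by omega, by omega⟩
        · have hmax : max (d1 - in1 * s1 + s1 - s1) 0 = 0 := by omega
          rw [hmax, add_zero] at hc
          exact hcase hc
      · rw [if_neg hmem]

-- ===== VERDICT (by name: the statement is the Claim_ definition above) =====
-- a findSome? scan from 1 can start at s0 when the prefix yields nothing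
theorem pv_skip_prefix {β : Type} (s0 out : Int) (g : Int → Option β) (h1 : 1 ≤ s0) (h2 : s0 ≤ out)
    (hpre : ∀ k0, 1 ≤ k0 → k0 < s0 → g k0 = none) :
    (PySem.List.pyRange 1 out 1).findSome? g = (PySem.List.pyRange s0 out 1).findSome? g := by
  rw [PySem.List.pyRange_one_append 1 s0 out h1 h2, List.findSome?_append]
  have hnone : (PySem.List.pyRange 1 s0 1).findSome? g = none := by
    rw [List.findSome?_eq_none_iff]
    intro k0 hk0
    rw [PySem.List.mem_pyRange_one] at hk0
    exact hpre k0 hk0.1 hk0.2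
  rw [hnone, Option.none_or]

theorem get_possible_kernel_size_deconv_spec : Claim_equal_get_possible_kernel_size_deconv := by
  intro input_shape output_shape next_input_shape _
  unfold Spec_get_possible_kernel_size_deconv
  cases next_input_shape with
  | none =>
    simp only [get_possible_kernel_size_deconv, get_possible_kernel_size_deconv_alt]
    have houter :
        (PySem.List.pyRange 1 output_shape 1).findSome? (fun s0 =>
          (PySem.List.pyRange 1 output_shape 1).findSome? (fun k0 =>
            (PySem.List.pyRange 1 output_shape 1).findSome? (fun s1 =>
              (PySem.List.pyRange 1 output_shape 1).findSome? (fun k1 =>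
                if (input_shape.1 * s0 + max (k0 - s0) 0) * (input_shape.2 * s1 + max (k1 - s1) 0) = output_shape ∧ (s0 ≤ k0 ∧ s1 ≤ k1)
                then some ((k0, k1), (s0, s1)) else none))))
        = (PySem.List.pyRange 1 output_shape 1).findSome? (fun s0 =>
          (PySem.List.pyRange s0 output_shape 1).findSome? (fun k0 =>
            if input_shape.1 * s0 + (k0 - s0) ≠ 0 ∧ PySem.Int.mod output_shape (input_shape.1 * s0 + (k0 - s0)) = 0 then
              (firstPairGE input_shape.2 (PySem.Int.floordiv output_shape (input_shape.1 * s0 + (k0 - s0))) output_shape).map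
                (fun p => ((k0, p.2), (s0, p.1)))
            else none)) := by
      apply pv_findSome?_congr
      intro s0 hs0
      rw [PySem.List.mem_pyRange_one] at hs0
      rw [pv_skip_prefix s0 output_shape _ (by omega) (by omega) ?_]
      · apply pv_findSome?_congr
        intro k0 hk0
        rw [PySem.List.mem_pyRange_one] at hk0
        have hmax0 : max (k0 - s0) 0 = k0 - s0 := by omega
        simp only [hmax0]
        by_cases hd : input_shape.1 * s0 + (k0 - s0) ≠ 0 ∧ PySem.Int.mod output_shape (input_shape.1 * s0 + (k0 - s0)) = 0
        · rw [if_pos hd]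
          exact pv_inner1 input_shape.2 output_shape _ s0 k0 hd.1 hd.2 hk0.1
        · rw [if_neg hd]
          rw [List.findSome?_eq_none_iff]
          intro s1 _
          rw [List.findSome?_eq_none_iff]
          intro k1 _
          rw [if_neg]
          rintro ⟨hprod, -, -⟩
          rcases not_and_or.mp hd with h0 | hm
          · rw [not_not] at h0
            rw [h0, zero_mul] at hprod
            omega
          · apply hm
            rw [PySem.Int.mod_eq_zero_iff_dvd]
            exact ⟨_, hprod.symm⟩
      · intro k0 _ hk0lt
        rw [List.findSome?_eq_none_iff]
        intro s1 _
        rw [List.findSome?_eq_none_iff]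
        intro k1 _
        rw [if_neg]
        rintro ⟨-, hks, -⟩
        omega
    rw [houter]
  | some nx =>
    simp only [get_possible_kernel_size_deconv, get_possible_kernel_size_deconv_alt]
    have houter :
        (PySem.List.pyRange 1 output_shape 1).findSome? (fun s0 =>
          (PySem.List.pyRange 1 output_shape 1).findSome? (fun k0 =>
            if input_shape.1 * s0 + max (k0 - s0) 0 ≤ nx.1 then
              (PySem.List.pyRange 1 output_shape 1).findSome? (fun s1 =>
                (PySem.List.pyRange 1 output_shape 1).findSome? (fun k1 =>
                  if (input_shape.1 * s0 + max (k0 - s0) 0) * (input_shape.2 * s1 + max (k1 - s1) 0) = output_shape ∧ input_shape.2 * s1 + max (k1 - s1) 0 ≤ nx.2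
                  then some ((k0, k1), (s0, s1)) else none))
            else none))
        = (PySem.List.pyRange 1 output_shape 1).findSome? (fun s0 =>
          (PySem.List.pyRange 1 output_shape 1).findSome? (fun k0 =>
            if input_shape.1 * s0 + max (k0 - s0) 0 ≤ nx.1 ∧ input_shape.1 * s0 + max (k0 - s0) 0 ≠ 0 ∧ PySem.Int.mod output_shape (input_shape.1 * s0 + max (k0 - s0) 0) = 0 then
              if PySem.Int.floordiv output_shape (input_shape.1 * s0 + max (k0 - s0) 0) ≤ nx.2 then
                (firstPairAny input_shape.2 (PySem.Int.floordiv output_shape (input_shape.1 * s0 + max (k0 - s0) 0)) output_shape).map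
                  (fun p => ((k0, p.2), (s0, p.1)))
              else none
            else none)) := by
      apply pv_findSome?_congr
      intro s0 hs0
      rw [PySem.List.mem_pyRange_one] at hs0
      apply pv_findSome?_congr
      intro k0 hk0
      rw [PySem.List.mem_pyRange_one] at hk0
      by_cases h1 : input_shape.1 * s0 + max (k0 - s0) 0 ≤ nx.1
      · by_cases h2 : input_shape.1 * s0 + max (k0 - s0) 0 ≠ 0 ∧ PySem.Int.mod output_shape (input_shape.1 * s0 + max (k0 - s0) 0) = 0
        · by_cases h3 : PySem.Int.floordiv output_shape (input_shape.1 * s0 + max (k0 - s0) 0) ≤ nx.2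
          · rw [if_pos h1, if_pos ⟨h1, h2.1, h2.2⟩, if_pos h3]
            exact pv_inner2 input_shape.2 output_shape _ nx.2 s0 k0 h2.1 h2.2 h3
          · rw [if_pos h1, if_pos ⟨h1, h2.1, h2.2⟩, if_neg h3]
            rw [List.findSome?_eq_none_iff]
            intro s1 _
            rw [List.findSome?_eq_none_iff]
            intro k1 _
            rw [if_neg]
            rintro ⟨hprod, hle⟩
            have hc := mul_left_cancel₀ h2.1 (hprod.trans (pv_mul_floordiv h2.2).symm)
            exact h3 (hc ▸ hle)
        · rw [if_pos h1, if_neg (by tauto)]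
          rw [List.findSome?_eq_none_iff]
          intro s1 _
          rw [List.findSome?_eq_none_iff]
          intro k1 _
          rw [if_neg]
          rintro ⟨hprod, -⟩
          rcases not_and_or.mp h2 with h0 | hm
          · rw [not_not] at h0
            rw [h0, zero_mul] at hprod
            omega
          · apply hm
            rw [PySem.Int.mod_eq_zero_iff_dvd]
            exact ⟨_, hprod.symm⟩
      · rw [if_neg h1, if_neg (by tauto)]
    rw [houter]
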